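-- pv_equiv track=rewrite | github.com/kayoung-dev/problem-solving | generator/level01/g173.py | get_ans_p173
-- ===== SOURCE A (Python) =====
-- def get_ans_p173(n):
--     if n <= 0: return 0
--     # k가 10^6일 때 k^3 계열이므로 약 10^18에 도달
--     low, high = 0, 2000000
--     ans = 0
--     while low <= high:
--         k = (low + high) // 2
--         if k == 0:
--             low = 1
--             continue
--
--         # 자연수 제곱의 합 공식: S = k(k+1)(2k+1) / 6
--         total_needed = k * (k + 1) * (2 * k + 1) // 6
--
--         if total_needed <= n:
--             ans = k
--             low = k + 1
--         else:
--             high = k - 1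
--     return ans
-- ===== SOURCE B (Python) =====
-- def get_ans_p173(n):
--     # B: single forward pass with a running sum of squares instead of
--     # binary search over the closed-form formula; same two-million cap.
--     if n <= 0:
--         return 0
--     ans = 0
--     total = 0
--     for k in range(1, 2000001):
--         total += k * k
--         if total > n:
--             break
--         ans = k
--     return ans
-- ===== Notes on version B (the rewrite author's own statement) =====
-- stated objective: alternative
-- what changed: Replaced the binary search over the closed-form sum-of-squares formula with a single forward pass that accumulates a running sum of squares and stops at the first k whose sum exceeds n (same two-million cap).
import Mathlib
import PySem

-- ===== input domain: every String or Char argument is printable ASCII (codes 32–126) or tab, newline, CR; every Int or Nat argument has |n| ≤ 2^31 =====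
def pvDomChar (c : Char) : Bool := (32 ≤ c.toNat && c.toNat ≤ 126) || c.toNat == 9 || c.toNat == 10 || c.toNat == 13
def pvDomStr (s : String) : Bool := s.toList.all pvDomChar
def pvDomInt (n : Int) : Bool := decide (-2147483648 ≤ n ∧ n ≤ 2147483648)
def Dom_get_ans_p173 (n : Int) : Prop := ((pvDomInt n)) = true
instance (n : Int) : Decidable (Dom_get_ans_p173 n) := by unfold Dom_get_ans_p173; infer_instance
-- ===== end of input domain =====

-- B replaces A's binary search on the closed-form sum formula by a single
-- forward pass with a running sum of squares (same 2,000,000 cap); return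
-- values are proved equal for every n.

-- ===== PORT A =====
-- A's while-loop: binary search on [low, high] with the formula k(k+1)(2k+1)//6.
-- The fuel argument only makes the loop total: 2000002 exceeds the measure
-- high + 1 - low of every reachable state, so the 0-fuel branch is never taken.
def pvALoop (fuel : Nat) (n low high ans : Int) : Int :=
  match fuel with
  | 0 => ans
  | fuel + 1 =>
    if low ≤ high then
      -- k = (low + high) // 2
      if PySem.Int.floordiv (low + high) 2 = 0 then
        pvALoop fuel n 1 high ans
      else
        -- total_needed = k * (k + 1) * (2 * k + 1) // 6
        if PySem.Int.floordiv (PySem.Int.floordiv (low + high) 2 * (PySem.Int.floordiv (low + high) 2 + 1) * (2 * PySem.Int.floordiv (low + high) 2 + 1)) 6 ≤ n then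
          pvALoop fuel n (PySem.Int.floordiv (low + high) 2 + 1) high (PySem.Int.floordiv (low + high) 2)
        else
          pvALoop fuel n low (PySem.Int.floordiv (low + high) 2 - 1) ans
    else ans

def get_ans_p173 (n : Int) : Int :=
  if n ≤ 0 then 0 else pvALoop 2000002 n 0 2000000 0

-- ===== PORT B =====
-- B's for-loop over range(1, 2000001): running sum of squares, break when it
-- exceeds n.  Fuel 2000001 covers the 2000000 iterations of the range.
def pvBLoop (fuel : Nat) (n k total ans : Int) : Int :=
  match fuel with
  | 0 => ans
  | fuel + 1 =>
    if k ≤ 2000000 then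
      -- total' = total + k * k
      if n < total + k * k then ans
      else pvBLoop fuel n (k + 1) (total + k * k) k
    else ans

def get_ans_p173_alt (n : Int) : Int :=
  if n ≤ 0 then 0 else pvBLoop 2000001 n 1 0 0

-- ===== PRECONDITION & SPEC =====
def Spec_get_ans_p173 (n : Int) (out : Int) : Prop := out = get_ans_p173_alt n
instance (n : Int) (out : Int) : Decidable (Spec_get_ans_p173 n out) := by unfold Spec_get_ans_p173; infer_instance

-- ===== CLAIM (what is proved, stated in full; the proofs are below) =====
def Claim_equal_get_ans_p173 : Prop := ∀ (n : Int), Dom_get_ans_p173 n → Spec_get_ans_p173 n (get_ans_p173 n)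

-- ===== LEMMAS AND PROOFS =====

-- p k = k(k+1)(2k+1) = 6 * (1² + … + k²)
def pvP (k : Int) : Int := k * (k + 1) * (2 * k + 1)

lemma pvP_mono {a b : Int} (ha : 0 ≤ a) (hab : a ≤ b) : pvP a ≤ pvP b := by
  unfold pvP
  nlinarith [mul_nonneg ha (sub_nonneg.2 hab), sq_nonneg (a + b), sq_nonneg (b - a),
    mul_nonneg (mul_nonneg ha ha) (sub_nonneg.2 hab)]

-- A's acceptance test, with the floor division bracketed away
lemma pvA_test (k n : Int) :
    (PySem.Int.floordiv (k * (k + 1) * (2 * k + 1)) 6 ≤ n) ↔ pvP k < (n + 1) * 6 := by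
  have h := PySem.Int.le_floordiv_iff_mul_le (a := k * (k + 1) * (2 * k + 1)) (b := 6)
    (q := n + 1) (by omega)
  unfold pvP
  omega

-- characterization of the common result: the largest k in [0, 2000000] with
-- k(k+1)(2k+1)/6 ≤ n, i.e. k(k+1)(2k+1) < 6(n+1)
def pvGood (n r : Int) : Prop :=
  0 ≤ r ∧ r ≤ 2000000 ∧ pvP r < (n + 1) * 6 ∧
    ∀ j, 0 ≤ j → j ≤ 2000000 → pvP j < (n + 1) * 6 → j ≤ r

lemma pvGood_unique {n a b : Int} (ha : pvGood n a) (hb : pvGood n b) : a = b :=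
  le_antisymm (hb.2.2.2 a ha.1 ha.2.1 ha.2.2.1) (ha.2.2.2 b hb.1 hb.2.1 hb.2.2.1)

lemma pvALoop_good (n : Int) :
    ∀ (fuel : Nat) (low high ans : Int), (high + 1 - low).toNat < fuel →
      0 ≤ low → high ≤ 2000000 → 0 ≤ ans → ans ≤ 2000000 →
      (ans < low ∨ ans = 0) → pvP ans < (n + 1) * 6 →
      (∀ j, 0 ≤ j → j ≤ 2000000 → pvP j < (n + 1) * 6 → (j ≤ ans ∨ (low ≤ j ∧ j ≤ high))) →
      pvGood n (pvALoop fuel n low high ans) := by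
  intro fuel
  induction fuel with
  | zero => intro low high ans hf; omega
  | succ f ih =>
    intro low high ans hf h0l hh h0a ha hal hpa hinv
    rw [pvALoop]
    by_cases hlh : low ≤ high
    · rw [if_pos hlh]
      have hb := PySem.Int.floordiv_two_mid_bounds hlh
      by_cases hk : PySem.Int.floordiv (low + high) 2 = 0
      · rw [if_pos hk]
        refine ih 1 high ans (by omega) (by omega) hh h0a ha (by omega) hpa ?_
        intro j hj0 hj2 hjp
        rcases hinv j hj0 hj2 hjp with h | h
        · exact Or.inl h
        · rcases eq_or_lt_of_le hj0 with rfl | hj1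
          · exact Or.inl h0a
          · exact Or.inr ⟨by omega, h.2⟩
      · rw [if_neg hk]
        by_cases ht : PySem.Int.floordiv (PySem.Int.floordiv (low + high) 2 * (PySem.Int.floordiv (low + high) 2 + 1) * (2 * PySem.Int.floordiv (low + high) 2 + 1)) 6 ≤ n
        · rw [if_pos ht]
          have hpk : pvP (PySem.Int.floordiv (low + high) 2) < (n + 1) * 6 :=
            (pvA_test (PySem.Int.floordiv (low + high) 2) n).1 ht
          refine ih _ high _ (by omega) (by omega) hh (by omega) (by omega) (by omega) hpk ?_
          intro j hj0 hj2 hjp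
          rcases hinv j hj0 hj2 hjp with h | h
          · omega
          · omega
        · rw [if_neg ht]
          have hpk : ¬ pvP (PySem.Int.floordiv (low + high) 2) < (n + 1) * 6 :=
            fun h => ht ((pvA_test (PySem.Int.floordiv (low + high) 2) n).2 h)
          refine ih low _ ans (by omega) h0l (by omega) h0a ha hal hpa ?_
          intro j hj0 hj2 hjp
          rcases hinv j hj0 hj2 hjp with h | h
          · exact Or.inl h
          · refine Or.inr ⟨h.1, ?_⟩
            by_contra hc
            exact hpk (lt_of_le_of_lt (pvP_mono (by omega) (by omega)) hjp)
    · rw [if_neg hlh]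
      exact ⟨h0a, ha, hpa, fun j hj0 hj2 hjp => by
        rcases hinv j hj0 hj2 hjp with h | h
        · exact h
        · omega⟩

lemma pvBLoop_good (n : Int) :
    ∀ (fuel : Nat) (k total ans : Int), (2000001 - k).toNat < fuel →
      1 ≤ k → k ≤ 2000001 → ans = k - 1 → 6 * total = pvP (k - 1) →
      total ≤ n → pvGood n (pvBLoop fuel n k total ans) := by
  intro fuel
  induction fuel with
  | zero => intro k total ans hf; omega
  | succ f ih =>
    intro k total ans hf hk1 hk2001 hans htot hle
    subst hans
    rw [pvBLoop]
    by_cases hk2 : k ≤ 2000000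
    · rw [if_pos hk2]
      have hpk : 6 * (total + k * k) = pvP k := by
        unfold pvP at htot ⊢; linear_combination htot
      by_cases hbr : n < total + k * k
      · rw [if_pos hbr]
        refine ⟨by omega, by omega, by omega, ?_⟩
        intro j hj0 hj2 hjp
        by_contra hc
        have hjk : k ≤ j := by omega
        have := pvP_mono (a := k) (b := j) (by omega) hjk
        omega
      · rw [if_neg hbr]
        exact ih (k + 1) (total + k * k) k (by omega) (by omega) (by omega) (by omega)
          (by simpa using hpk) (by omega)
    · rw [if_neg hk2]
      have hkk : k = 2000001 := by omega
      subst hkk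
      refine ⟨by omega, by omega, by omega, fun j _ hj2 _ => by omega⟩

-- ===== VERDICT (by name: the statement is the Claim_ definition above) =====
theorem get_ans_p173_spec : Claim_equal_get_ans_p173 := by
  intro n _
  unfold Spec_get_ans_p173 get_ans_p173 get_ans_p173_alt
  by_cases hn : n ≤ 0
  · simp [hn]
  · simp only [if_neg hn]
    have hA := pvALoop_good n 2000002 0 2000000 0 (by norm_num) (by omega) (by omega)
      (by omega) (by omega) (Or.inr rfl) (by unfold pvP; omega)
      (fun j hj0 hj2 _ => Or.inr ⟨hj0, hj2⟩)
    have hB := pvBLoop_good n 2000001 1 0 0 (by norm_num) (by omega) (by omega) (by omega)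
      (by unfold pvP; ring) (by omega)
    exact pvGood_unique hA hB
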